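-- pv_equiv track=rewrite | github.com/Pool-NS/4.15-Dibujo-de-un-cuadrado. | 4.15 Dibujo de un cuadrado..py | dibujar_cuadrado_bordes
-- ===== SOURCE A (Python) =====
-- def dibujar_cuadrado_bordes(tamano):
--     if tamano < 2:
--         return "*"
--
--     cuadrado = []
--     for i in range(tamano):
--         if i == 0 or i == tamano - 1:
--             cuadrado.append('*' * tamano)
--         else:
--             cuadrado.append('*' + ' ' * (tamano - 2) + '*')
--
--     return '\n'.join(cuadrado)
-- ===== SOURCE B (Python) =====
-- def dibujar_cuadrado_bordes(tamano):
--     if tamano < 2: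
--         return "*"
--     w = tamano + 1
--     buf = bytearray(b' ' * (tamano * w - 1))
--     buf[tamano::w] = b'\n' * (tamano - 1)
--     buf[0:tamano] = b'*' * tamano
--     buf[(tamano - 1) * w:(tamano - 1) * w + tamano] = b'*' * tamano
--     buf[::w] = b'*' * tamano
--     buf[tamano - 1::w] = b'*' * tamano
--     return buf.decode('ascii')
-- ===== Notes on version B (the rewrite author's own statement) =====
-- stated objective: alternative
-- what changed: Replaces A's build-each-row-and-join loop by a drawing-on-canvas algorithm: allocate one flat blank buffer (rows separated by newline slots) and paint the newline column, top/bottom rows and left/right columns with five strided slice assignments.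
import Mathlib
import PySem

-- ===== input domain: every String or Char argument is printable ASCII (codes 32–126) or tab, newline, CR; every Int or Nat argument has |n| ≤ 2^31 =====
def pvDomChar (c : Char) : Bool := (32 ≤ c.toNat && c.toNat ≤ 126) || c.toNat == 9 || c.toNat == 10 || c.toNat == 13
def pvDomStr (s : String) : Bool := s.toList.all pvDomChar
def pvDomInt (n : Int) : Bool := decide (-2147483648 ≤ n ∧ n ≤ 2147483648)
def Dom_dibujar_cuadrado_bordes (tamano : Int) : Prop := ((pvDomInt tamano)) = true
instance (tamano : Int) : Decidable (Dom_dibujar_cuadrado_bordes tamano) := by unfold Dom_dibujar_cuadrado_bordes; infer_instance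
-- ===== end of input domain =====

-- B replaces A's build-each-row-and-join loop by drawing on a flat blank canvas: five strided
-- slice assignments paint the newline column and the four borders (objective: alternative).


-- ===== PORT A =====
def dibujar_cuadrado_bordes (tamano : Int) : String :=
  if tamano < 2 then "*"
  else
    let cuadrado : List String :=
      (PySem.List.pyRange 0 tamano 1).foldl (fun acc i =>
        if i = 0 ∨ i = tamano - 1 then
          acc ++ [String.ofList (PySem.List.pyRepeat ['*'] tamano)]
        else
          acc ++ [String.ofList (['*'] ++ PySem.List.pyRepeat [' '] (tamano - 2) ++ ['*'])]) []
    PySem.Str.join "\n" cuadrado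

-- ===== PORT B =====
-- B-side helper: a strided slice assignment buf[start:stop:step] = ch*len (uniform fill), ported
-- elementwise over the index range it touches (exact: CPython assigns exactly these indices).
def pvPaint (buf : List Char) (start stop step : Int) (c : Char) : List Char :=
  (PySem.List.pyRange start stop step).foldl (fun b i => PySem.List.pySetD b i c) buf

-- bytearray of spaces → List Char; each slice assignment → pvPaint; .decode('ascii') → String.ofList.
def dibujar_cuadrado_bordes_alt (tamano : Int) : String :=
  if tamano < 2 then "*"
  else
    let w := tamano + 1
    let buf0 := PySem.List.pyRepeat [' '] (tamano * w - 1)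
    let buf1 := pvPaint buf0 tamano (tamano * w - 1) w '\n'
    let buf2 := pvPaint buf1 0 tamano 1 '*'
    let buf3 := pvPaint buf2 ((tamano - 1) * w) ((tamano - 1) * w + tamano) 1 '*'
    let buf4 := pvPaint buf3 0 (tamano * w - 1) w '*'
    let buf5 := pvPaint buf4 (tamano - 1) (tamano * w - 1) w '*'
    String.ofList buf5

-- ===== PRECONDITION & SPEC =====
def Spec_dibujar_cuadrado_bordes (tamano : Int) (out : String) : Prop := out = dibujar_cuadrado_bordes_alt tamano
instance (tamano : Int) (out : String) : Decidable (Spec_dibujar_cuadrado_bordes tamano out) := by unfold Spec_dibujar_cuadrado_bordes; infer_instance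

-- ===== CLAIM (what is proved, stated in full; the proofs are below) =====
def Claim_equal_dibujar_cuadrado_bordes : Prop := ∀ (tamano : Int), Dom_dibujar_cuadrado_bordes tamano → Spec_dibujar_cuadrado_bordes tamano (dibujar_cuadrado_bordes tamano)

-- ===== LEMMAS AND PROOFS =====

-- B's per-cell character function, with the square size as parameter.
def pvG (t k : Int) : Char :=
  if PySem.Int.mod k (t + 1) = t then '\n'
  else if PySem.Int.floordiv k (t + 1) = 0 ∨ PySem.Int.floordiv k (t + 1) = t - 1 ∨
          PySem.Int.mod k (t + 1) = 0 ∨ PySem.Int.mod k (t + 1) = t - 1 then '*'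
  else ' '

-- Row i of the square, as B's border test produces it (Nat level).
def pvRow (N i : Nat) : List Char :=
  (List.range N).map (fun j => if i = 0 ∨ i = N - 1 ∨ j = 0 ∨ j = N - 1 then '*' else ' ')

theorem pv_mod_div (i j w : Int) (hw : 0 < w) (hj0 : 0 ≤ j) (hjw : j < w) :
    PySem.Int.mod (j + w * i) w = j ∧ PySem.Int.floordiv (j + w * i) w = i := by
  rw [PySem.Int.mod_eq_emod_of_pos hw, PySem.Int.floordiv_eq_ediv_of_pos hw]
  constructor
  · rw [Int.add_mul_emod_self_left, Int.emod_eq_of_lt hj0 hjw]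
  · rw [Int.add_mul_ediv_left _ _ (by omega : w ≠ 0), Int.ediv_eq_zero_of_lt hj0 hjw]
    omega

-- Evaluating B's cell function at coordinates (i, j), j ≤ N.
theorem pvG_eval (N i j : Nat) (hN : 2 ≤ N) (hj : j ≤ N) :
    pvG (N : Int) ((i : Int) * ((N : Int) + 1) + (j : Int))
      = if j = N then '\n'
        else if i = 0 ∨ i = N - 1 ∨ j = 0 ∨ j = N - 1 then '*' else ' ' := by
  have h := pv_mod_div (i : Int) (j : Int) ((N : Int) + 1) (by omega)
    (by omega) (by exact_mod_cast by omega)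
  unfold pvG
  rw [show (i : Int) * ((N : Int) + 1) + (j : Int) = (j : Int) + ((N : Int) + 1) * (i : Int) by ring,
    h.1, h.2]
  split_ifs <;> first | rfl | omega

-- A's full row equals B's border row at i = 0 or i = N - 1.
theorem pv_join_cons (sep a : List Char) (l : List (List Char)) (h : l ≠ []) :
    PySem.Chars.join sep (a :: l) = a ++ sep ++ PySem.Chars.join sep l := by
  cases l with
  | nil => exact absurd rfl h
  | cons b l => exact PySem.Chars.join_cons_cons sep a b l

-- A's full row equals B's border row at i = 0 or i = N - 1.
theorem pv_row_full (N i : Nat) (hi : i = 0 ∨ i = N - 1) :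
    pvRow N i = PySem.List.pyRepeat ['*'] (N : Int) := by
  rw [PySem.List.pyRepeat_singleton, Int.toNat_natCast]
  unfold pvRow
  have hconst : ∀ j : Nat, (if i = 0 ∨ i = N - 1 ∨ j = 0 ∨ j = N - 1 then '*' else ' ') = '*' :=
    fun j => if_pos (hi.imp id Or.inl)
  simp only [hconst]
  simp

-- A's middle row equals B's border row for 0 < i < N - 1.
theorem pv_row_mid (N i : Nat) (hN : 2 ≤ N) (hi0 : i ≠ 0) (hi1 : i ≠ N - 1) :
    pvRow N i = ['*'] ++ PySem.List.pyRepeat [' '] ((N : Int) - 2) ++ ['*'] := by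
  obtain ⟨m, rfl⟩ : ∃ m, N = m + 2 := ⟨N - 2, by omega⟩
  rw [show ((m + 2 : Nat) : Int) - 2 = (m : Int) by push_cast; ring,
    PySem.List.pyRepeat_singleton, Int.toNat_natCast]
  unfold pvRow
  rw [List.range_succ, List.range_succ_eq_map, List.map_append, List.map_cons, List.map_map]
  have h0 : (if i = 0 ∨ i = m + 2 - 1 ∨ 0 = 0 ∨ 0 = m + 2 - 1 then '*' else ' ') = '*' := by simp
  have hlast : (if i = 0 ∨ i = m + 2 - 1 ∨ m + 1 = 0 ∨ m + 1 = m + 2 - 1 then '*' else ' ') = '*' := by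
    simp
  have hmid : (List.range m).map
      ((fun j => if i = 0 ∨ i = m + 2 - 1 ∨ j = 0 ∨ j = m + 2 - 1 then '*' else ' ') ∘ Nat.succ)
      = List.replicate m ' ' := by
    apply List.eq_replicate_iff.mpr
    refine ⟨by simp, ?_⟩
    intro c hc
    rcases List.mem_map.mp hc with ⟨j, hj, rfl⟩
    have hjm := List.mem_range.mp hj
    simp only [Function.comp]
    rw [if_neg (by omega)]
  rw [List.map_singleton, h0, hlast, hmid]
  simp

-- The flat index range, chunked by rows, yields the joined rows.
theorem pv_chunks (N : Nat) (hN : 2 ≤ N) : ∀ (m i : Nat), 1 ≤ m → i + m = N →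
    (PySem.List.pyRange ((i : Int) * ((N : Int) + 1)) ((N : Int) * ((N : Int) + 1) - 1) 1).map
        (pvG (N : Int))
      = PySem.Chars.join ['\n'] ((List.range m).map (fun d => pvRow N (i + d))) := by
  intro m
  induction m with
  | zero => intro i h1 _; omega
  | succ m ih =>
    intro i _ hsum
    by_cases hm : m = 0
    · subst hm
      have hi : i = N - 1 := by omega
      have hend : (N : Int) * ((N : Int) + 1) - 1 = (i : Int) * ((N : Int) + 1) + (N : Int) := by
        have hi' : (i : Int) = (N : Int) - 1 := by omega
        rw [hi']; ring
      rw [hend, PySem.List.pyRange_one, add_sub_cancel_left, Int.toNat_natCast, List.map_map]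
      rw [List.range_one, List.map_singleton, PySem.Chars.join_singleton,
        show i + 0 = i from rfl]
      unfold pvRow
      apply List.map_congr_left
      intro k hk
      have hkN := List.mem_range.mp hk
      simp only [Function.comp]
      rw [pvG_eval N i k hN (by omega), if_neg (by omega)]
    · have hmid_le : (i : Int) * ((N : Int) + 1) ≤ ((i : Int) + 1) * ((N : Int) + 1) := by nlinarith
      have htop_le : ((i : Int) + 1) * ((N : Int) + 1) ≤ (N : Int) * ((N : Int) + 1) - 1 := by
        have : (i : Int) + 2 ≤ (N : Int) := by omega
        nlinarith
      rw [PySem.List.pyRange_one_append _ (((i : Int) + 1) * ((N : Int) + 1)) _ hmid_le htop_le,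
        List.map_append]
      have hfirst : (PySem.List.pyRange ((i : Int) * ((N : Int) + 1))
          (((i : Int) + 1) * ((N : Int) + 1)) 1).map (pvG (N : Int))
          = pvRow N i ++ ['\n'] := by
        rw [show ((i : Int) + 1) * ((N : Int) + 1)
            = (i : Int) * ((N : Int) + 1) + ((N + 1 : Nat) : Int) by push_cast; ring,
          PySem.List.pyRange_one, add_sub_cancel_left, Int.toNat_natCast, List.map_map,
          List.range_succ, List.map_append, List.map_singleton]
        have hlast : (pvG (N : Int) ∘ fun k : Nat => (i : Int) * ((N : Int) + 1) + (k : Int)) N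
            = '\n' := by
          simp only [Function.comp]
          rw [pvG_eval N i N hN (le_refl N), if_pos rfl]
        rw [hlast]
        unfold pvRow
        congr 1
        apply List.map_congr_left
        intro k hk
        have hkN := List.mem_range.mp hk
        simp only [Function.comp]
        rw [pvG_eval N i k hN (by omega), if_neg (by omega)]
      have hsecond := ih (i + 1) (by omega) (by omega)
      push_cast at hsecond
      rw [hfirst, hsecond]
      rw [List.range_succ_eq_map, List.map_cons, List.map_map]
      have hshift : (List.range m).map ((fun d => pvRow N (i + d)) ∘ Nat.succ)
          = (List.range m).map (fun d => pvRow N (i + 1 + d)) := by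
        apply List.map_congr_left
        intro d _
        simp only [Function.comp]
        rw [show i + (d + 1) = i + 1 + d by omega]
      rw [show i + 0 = i from rfl, hshift,
        pv_join_cons _ _ _ (by simp [hm, List.range_eq_nil])]

theorem pv_paint_length (buf : List Char) (start stop step : Int) (c : Char) :
    (pvPaint buf start stop step c).length = buf.length := by
  unfold pvPaint
  generalize PySem.List.pyRange start stop step = l
  induction l generalizing buf with
  | nil => rfl
  | cons i tl ih =>
    rw [List.foldl_cons, ih (PySem.List.pySetD buf i c), PySem.List.length_pySetD]

theorem pv_getD_set (xs : List Char) (n k : Nat) (v d : Char) (hk : k < xs.length) :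
    (xs.set n v).getD k d = if n = k then v else xs.getD k d := by
  rw [List.getD_eq_getElem _ _ (by simpa using hk), List.getD_eq_getElem _ _ hk,
    List.getElem_set]

theorem pv_foldl_set_getD (c d : Char) (k : Nat) :
    ∀ (l : List Int) (buf : List Char), (∀ i ∈ l, 0 ≤ i) → k < buf.length →
    (l.foldl (fun b i => PySem.List.pySetD b i c) buf).getD k d
      = if (k : Int) ∈ l then c else buf.getD k d := by
  intro l
  induction l with
  | nil => intro buf _ _; simp
  | cons i tl ih =>
    intro buf hl hk
    rw [List.foldl_cons,
      ih (PySem.List.pySetD buf i c) (fun j hj => hl j (List.mem_cons_of_mem _ hj))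
        (by rw [PySem.List.length_pySetD]; exact hk),
      PySem.List.pySetD_of_nonneg _ _ (hl i List.mem_cons_self)]
    by_cases hmem : (k : Int) ∈ tl
    · simp [hmem]
    · have hi0 := hl i List.mem_cons_self
      rw [if_neg hmem, pv_getD_set _ _ _ _ _ hk]
      by_cases hik : i = (k : Int)
      · rw [if_pos (by omega), if_pos (by simp [hik])]
      · rw [if_neg (by omega), if_neg (by simp only [List.mem_cons, hmem, or_false]; omega)]

theorem pv_paint_getD (buf : List Char) (start stop step : Int) (c d : Char) (k : Nat)
    (hstep : 0 < step) (hstart : 0 ≤ start) (hk : k < buf.length) :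
    (pvPaint buf start stop step c).getD k d
      = if start ≤ (k : Int) ∧ (k : Int) < stop ∧ step ∣ (k : Int) - start then c
        else buf.getD k d := by
  unfold pvPaint
  rw [pv_foldl_set_getD c d k _ buf
    (fun i hi => by
      have := (PySem.List.mem_pyRange_iff_of_pos hstep i).mp hi
      omega) hk]
  simp only [PySem.List.mem_pyRange_iff_of_pos hstep]

theorem pv_dvd_small (w x : Int) (hw : 0 < w) (h1 : -w < x) (h2 : x < w) : w ∣ x ↔ x = 0 := by
  constructor
  · rintro ⟨cq, rfl⟩
    have hc1 : cq < 1 := by nlinarith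
    have hc2 : -1 < cq := by nlinarith
    have : cq = 0 := by omega
    simp [this]
  · rintro rfl; exact dvd_zero w

-- The painted canvas is exactly the flat border-test picture, cell by cell.
set_option maxHeartbeats 1000000 in
theorem pv_canvas (N : Nat) (hN : 2 ≤ N) :
    pvPaint (pvPaint (pvPaint (pvPaint (pvPaint
        (PySem.List.pyRepeat [' '] ((N : Int) * ((N : Int) + 1) - 1))
        (N : Int) ((N : Int) * ((N : Int) + 1) - 1) ((N : Int) + 1) '\n')
        0 (N : Int) 1 '*')
        (((N : Int) - 1) * ((N : Int) + 1)) (((N : Int) - 1) * ((N : Int) + 1) + (N : Int)) 1 '*')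
        0 ((N : Int) * ((N : Int) + 1) - 1) ((N : Int) + 1) '*')
        ((N : Int) - 1) ((N : Int) * ((N : Int) + 1) - 1) ((N : Int) + 1) '*'
      = (PySem.List.pyRange 0 ((N : Int) * ((N : Int) + 1) - 1) 1).map (pvG (N : Int)) := by
  have h1NN : 1 ≤ N * (N + 1) := by nlinarith
  have hLcast : (((N * (N + 1) - 1 : Nat)) : Int) = (N : Int) * ((N : Int) + 1) - 1 := by
    rw [Nat.cast_sub h1NN]; push_cast; ring
  have hrep : (PySem.List.pyRepeat [' '] ((N : Int) * ((N : Int) + 1) - 1)).length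
      = N * (N + 1) - 1 := by
    rw [PySem.List.pyRepeat_singleton, List.length_replicate, ← hLcast, Int.toNat_natCast]
  apply List.ext_getElem
  · rw [pv_paint_length, pv_paint_length, pv_paint_length, pv_paint_length, pv_paint_length,
      hrep, List.length_map, PySem.List.length_pyRange_one, sub_zero, ← hLcast,
      Int.toNat_natCast]
  · intro k hklhs hkrhs
    have hkL : k < N * (N + 1) - 1 := by
      rw [pv_paint_length, pv_paint_length, pv_paint_length, pv_paint_length, pv_paint_length,
        hrep] at hklhs
      exact hklhs
    have hkI : (k : Int) < (N : Int) * ((N : Int) + 1) - 1 := by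
      rw [← hLcast]; exact_mod_cast hkL
    -- right-hand side: the cell function at k
    rw [List.getElem_map, PySem.List.getElem_pyRange_one, zero_add]
    -- left-hand side: peel the five paints via getD
    rw [← List.getD_eq_getElem _ ' ' hklhs]
    rw [pv_paint_getD _ _ _ _ _ _ _ (by omega) (by omega)
      (by rw [pv_paint_length, pv_paint_length, pv_paint_length, pv_paint_length, hrep]; exact hkL)]
    rw [pv_paint_getD _ _ _ _ _ _ _ (by omega) (by omega)
      (by rw [pv_paint_length, pv_paint_length, pv_paint_length, hrep]; exact hkL)]
    rw [pv_paint_getD _ _ _ _ _ _ _ (by omega) (by nlinarith)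
      (by rw [pv_paint_length, pv_paint_length, hrep]; exact hkL)]
    rw [pv_paint_getD _ _ _ _ _ _ _ (by omega) (by omega)
      (by rw [pv_paint_length, hrep]; exact hkL)]
    rw [pv_paint_getD _ _ _ _ _ _ _ (by omega) (by omega) (by rw [hrep]; exact hkL)]
    rw [PySem.List.pyRepeat_singleton, List.getD_eq_getElem _ _ (by
        rw [List.length_replicate, ← hLcast, Int.toNat_natCast]; exact hkL),
      List.getElem_replicate]
    -- coordinates of cell k
    obtain ⟨q, r, hkqr, hrlt⟩ : ∃ q r, (N + 1) * q + r = k ∧ r < N + 1 :=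
      ⟨k / (N + 1), k % (N + 1), Nat.div_add_mod k (N + 1), Nat.mod_lt _ (by omega)⟩
    have hkqrI : (k : Int) = (r : Int) + ((N : Int) + 1) * (q : Int) := by
      push_cast [← hkqr]; ring
    have hmd := pv_mod_div (q : Int) (r : Int) ((N : Int) + 1) (by omega) (by omega)
      (by exact_mod_cast hrlt)
    have hqle : (q : Int) ≤ (N : Int) - 1 := by
      by_contra hcon
      have : (N : Int) ≤ (q : Int) := by omega
      nlinarith
    have hqN : (r : Int) = (N : Int) → (q : Int) ≤ (N : Int) - 2 := by
      intro hrN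
      by_contra hcon
      have : (q : Int) = (N : Int) - 1 := by omega
      rw [hkqrI, hrN, this] at hkI
      nlinarith
    -- each paint condition, in coordinates
    have e5 : ((N : Int) - 1 ≤ (k : Int) ∧ (k : Int) < (N : Int) * ((N : Int) + 1) - 1 ∧
        ((N : Int) + 1) ∣ (k : Int) - ((N : Int) - 1)) ↔ (r : Int) = (N : Int) - 1 := by
      have hdvd : ((N : Int) + 1) ∣ (k : Int) - ((N : Int) - 1) ↔ (r : Int) = (N : Int) - 1 := by
        rw [hkqrI, show (r : Int) + ((N : Int) + 1) * (q : Int) - ((N : Int) - 1)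
            = ((r : Int) - ((N : Int) - 1)) + ((N : Int) + 1) * (q : Int) by ring,
          Int.dvd_add_self_mul,
          pv_dvd_small _ _ (by omega) (by omega) (by omega)]
        omega
      constructor
      · rintro ⟨_, _, hd⟩; exact hdvd.mp hd
      · intro hrN
        refine ⟨by omega, ?_, hdvd.mpr hrN⟩
        rw [hkqrI, hrN]; nlinarith
    have e4 : ((0 : Int) ≤ (k : Int) ∧ (k : Int) < (N : Int) * ((N : Int) + 1) - 1 ∧
        ((N : Int) + 1) ∣ (k : Int) - 0) ↔ (r : Int) = 0 := by
      have hdvd : ((N : Int) + 1) ∣ (k : Int) - 0 ↔ (r : Int) = 0 := by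
        rw [hkqrI, show (r : Int) + ((N : Int) + 1) * (q : Int) - 0
            = (r : Int) + ((N : Int) + 1) * (q : Int) by ring,
          Int.dvd_add_self_mul,
          pv_dvd_small _ _ (by omega) (by omega) (by omega)]
      constructor
      · rintro ⟨_, _, hd⟩; exact hdvd.mp hd
      · intro hr0; exact ⟨by omega, hkI, hdvd.mpr hr0⟩
    have e3 : (((N : Int) - 1) * ((N : Int) + 1) ≤ (k : Int) ∧
        (k : Int) < ((N : Int) - 1) * ((N : Int) + 1) + (N : Int) ∧ (1 : Int) ∣ (k : Int) - ((N : Int) - 1) * ((N : Int) + 1)) ↔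
        ((q : Int) = (N : Int) - 1 ∧ (r : Int) < (N : Int)) := by
      constructor
      · rintro ⟨hlo, hhi, _⟩
        rw [hkqrI] at hlo hhi
        have hq' : (N : Int) - 1 ≤ (q : Int) := by nlinarith
        have : (q : Int) = (N : Int) - 1 := by omega
        refine ⟨this, ?_⟩
        rw [this] at hhi; nlinarith
      · rintro ⟨hqe, hre⟩
        rw [hkqrI, hqe]
        exact ⟨by nlinarith, by nlinarith, one_dvd _⟩
    have e2 : ((0 : Int) ≤ (k : Int) ∧ (k : Int) < (N : Int) ∧ (1 : Int) ∣ (k : Int) - 0) ↔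
        ((q : Int) = 0 ∧ (r : Int) < (N : Int)) := by
      constructor
      · rintro ⟨_, hhi, _⟩
        rw [hkqrI] at hhi
        have hq0 : (q : Int) = 0 := by
          by_contra hcon
          have : (1 : Int) ≤ (q : Int) := by omega
          nlinarith
        rw [hq0] at hhi
        exact ⟨hq0, by omega⟩
      · rintro ⟨hqe, hre⟩
        rw [hkqrI, hqe]
        exact ⟨by omega, by omega, one_dvd _⟩
    have e1 : ((N : Int) ≤ (k : Int) ∧ (k : Int) < (N : Int) * ((N : Int) + 1) - 1 ∧
        ((N : Int) + 1) ∣ (k : Int) - (N : Int)) ↔ (r : Int) = (N : Int) := by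
      have hdvd : ((N : Int) + 1) ∣ (k : Int) - (N : Int) ↔ (r : Int) = (N : Int) := by
        rw [hkqrI, show (r : Int) + ((N : Int) + 1) * (q : Int) - (N : Int)
            = ((r : Int) - (N : Int)) + ((N : Int) + 1) * (q : Int) by ring,
          Int.dvd_add_self_mul,
          pv_dvd_small _ _ (by omega) (by omega) (by omega)]
        omega
      constructor
      · rintro ⟨_, _, hd⟩; exact hdvd.mp hd
      · intro hrN
        refine ⟨by rw [hkqrI, hrN]; nlinarith, hkI, hdvd.mpr hrN⟩
    rw [show pvG (N : Int) (k : Int)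
        = pvG (N : Int) ((r : Int) + ((N : Int) + 1) * (q : Int)) by rw [← hkqrI]]
    unfold pvG
    rw [hmd.1, hmd.2]
    simp only [e1, e2, e3, e4, e5]
    have hrleN : (r : Int) ≤ (N : Int) := by exact_mod_cast by omega
    split_ifs <;> first | rfl | omega

theorem dibujar_cuadrado_bordes_eq_alt (tamano : Int) :
    dibujar_cuadrado_bordes tamano = dibujar_cuadrado_bordes_alt tamano := by
  unfold dibujar_cuadrado_bordes dibujar_cuadrado_bordes_alt
  by_cases h : tamano < 2
  · simp [h]
  · have h2 : (2 : Int) ≤ tamano := by omega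
    obtain ⟨N, hNt⟩ : ∃ N : Nat, (N : Int) = tamano :=
      ⟨tamano.toNat, Int.toNat_of_nonneg (by omega)⟩
    subst hNt
    have hN : 2 ≤ N := by exact_mod_cast h2
    simp only [if_neg h]
    rw [show (fun (acc : List String) (i : Int) =>
        if i = 0 ∨ i = (N : Int) - 1 then
          acc ++ [String.ofList (PySem.List.pyRepeat ['*'] (N : Int))]
        else
          acc ++ [String.ofList (['*'] ++ PySem.List.pyRepeat [' '] ((N : Int) - 2) ++ ['*'])])
      = (fun acc i => acc ++ [if i = 0 ∨ i = (N : Int) - 1 then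
          String.ofList (PySem.List.pyRepeat ['*'] (N : Int))
        else String.ofList (['*'] ++ PySem.List.pyRepeat [' '] ((N : Int) - 2) ++ ['*'])]) from by
        funext acc i; split_ifs <;> rfl]
    rw [PySem.List.foldl_append_singleton_eq_map]
    have hc := pv_chunks N hN N 0 (by omega) (by omega)
    simp only [Nat.cast_zero, zero_mul, zero_add] at hc
    apply String.toList_inj.mp
    rw [String.toList_ofList, pv_canvas N hN, hc, PySem.Str.toList_join, List.nil_append,
      List.map_map,
      show "\n".toList = ['\n'] from rfl, PySem.List.pyRange_zero_nat, List.map_map]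
    congr 1
    apply List.map_congr_left
    intro k hk
    have hkN := List.mem_range.mp hk
    simp only [Function.comp]
    by_cases hedge : k = 0 ∨ k = N - 1
    · rw [if_pos (show ((k : Nat) : Int) = 0 ∨ ((k : Nat) : Int) = (N : Int) - 1 by omega),
        String.toList_ofList, pv_row_full N k hedge]
    · push Not at hedge
      rw [if_neg (show ¬(((k : Nat) : Int) = 0 ∨ ((k : Nat) : Int) = (N : Int) - 1) by omega),
        String.toList_ofList, pv_row_mid N k hN hedge.1 hedge.2]

-- ===== VERDICT (by name: the statement is the Claim_ definition above) =====
theorem dibujar_cuadrado_bordes_spec : Claim_equal_dibujar_cuadrado_bordes := by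
  intro tamano _
  exact dibujar_cuadrado_bordes_eq_alt tamano
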